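-- pv_equiv track=rewrite | github.com/TheMatjaz/minihit | minihit/getconflicts.py | linear_conflicts
-- ===== SOURCE A (Python) =====
-- from typing import Generator, Set
--
-- def linear_conflicts(amount_conflicts: int, cardinality: int,
--                      overlap: int = 1
--                      ) -> Generator[Set[int], None, None]:
--     """
--     Generator of a linear sequence of conflicts containing integers with
--     overlapping values between neighbours.
--
--     Args:
--         amount_conflicts: number of conflicts to generate
--         cardinality: size of each conflict in the sequence
--         overlap: amount of values to be overlapping
--
--     Returns:
--         generator of the conflicts.
--     """
--     if overlap > cardinality:
--         raise ValueError("Overlap must be smaller than cardinality.")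
--     if amount_conflicts <= 0 or cardinality <= 0 or overlap <= 0:
--         raise ValueError(
--             "The linear problem parameters must be strictly positive.")
--     previous_last = 1
--     for conflict_index in range(amount_conflicts):
--         conflict = set(range(previous_last, previous_last + cardinality))
--         previous_last += cardinality - overlap
--         yield conflict
-- ===== SOURCE B (Python) =====
-- from typing import Generator, Set
--
-- def linear_conflicts(amount_conflicts: int, cardinality: int,
--                      overlap: int = 1
--                      ) -> Generator[Set[int], None, None]:
--     """Materialize the whole underlying integer line ONCE, then peel each
--     conflict off its front by slicing: the next conflict is the first
--     `cardinality` elements of the remaining line, and the line advances by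
--     dropping `cardinality - overlap` elements."""
--     if overlap > cardinality:
--         raise ValueError("Overlap must be smaller than cardinality.")
--     if amount_conflicts <= 0 or cardinality <= 0 or overlap <= 0:
--         raise ValueError(
--             "The linear problem parameters must be strictly positive.")
--     step = cardinality - overlap
--     line = list(range(1, 1 + cardinality + (amount_conflicts - 1) * step))
--     remaining = amount_conflicts
--     while remaining:
--         yield set(line[:cardinality])
--         line = line[step:]
--         remaining -= 1
-- ===== Notes on version B (the rewrite author's own statement) =====
-- stated objective: alternative
-- what changed: B builds the whole underlying integer line once as a single list and then peels each conflict off its front by slicing (take cardinality, then drop cardinality-overlap), instead of constructing each conflict as a fresh range from a running start counter.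
import Mathlib
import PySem

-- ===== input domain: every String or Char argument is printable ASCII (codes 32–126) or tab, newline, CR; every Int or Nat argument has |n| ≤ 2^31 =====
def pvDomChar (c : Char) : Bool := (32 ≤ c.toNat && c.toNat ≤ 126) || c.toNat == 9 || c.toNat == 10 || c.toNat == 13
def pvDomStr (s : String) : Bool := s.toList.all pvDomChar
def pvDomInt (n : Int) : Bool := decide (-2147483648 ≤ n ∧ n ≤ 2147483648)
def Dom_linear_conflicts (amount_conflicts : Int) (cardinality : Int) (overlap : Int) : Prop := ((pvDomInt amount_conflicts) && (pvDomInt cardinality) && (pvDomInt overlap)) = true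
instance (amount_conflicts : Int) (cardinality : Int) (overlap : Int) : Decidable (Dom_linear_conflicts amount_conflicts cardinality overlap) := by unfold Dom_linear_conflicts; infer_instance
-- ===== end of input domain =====

-- B builds the whole underlying integer line once and peels each conflict off its
-- front by slicing, instead of constructing each conflict as a fresh range from a
-- running counter (objective: alternative decomposition, same cost).
-- Both Pythons are generators; the equivalence is about the fully consumed sequence.

-- ===== PORT A =====
-- loop state: (previous_last, conflicts emitted so far); each conflict is set(range(..)),
-- whose distinct elements in iteration order are exactly the range list
def linear_conflicts (amount_conflicts : Int) (cardinality : Int) (overlap : Int) : List (List Int) :=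
  ((PySem.List.pyRange 0 amount_conflicts 1).foldl
    (fun (st : Int × List (List Int)) (_ : Int) =>
      let conflict := PySem.List.pyRange st.1 (st.1 + cardinality) 1
      (st.1 + (cardinality - overlap), st.2 ++ [conflict]))
    ((1 : Int), ([] : List (List Int)))).2

-- ===== PORT B =====
-- the while loop of Source B: peel `remaining` windows off the front of `line`
def pv_peel (remaining : Nat) (cardinality step : Int) (line : List Int) : List (List Int) :=
  match remaining with
  | 0 => []
  | n + 1 =>
    PySem.List.slice line none (some cardinality)
      :: pv_peel n cardinality step (PySem.List.slice line (some step) none)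

def linear_conflicts_alt (amount_conflicts : Int) (cardinality : Int) (overlap : Int) : List (List Int) :=
  let step := cardinality - overlap
  let line := PySem.List.pyRange 1 (1 + cardinality + (amount_conflicts - 1) * step) 1
  pv_peel amount_conflicts.toNat cardinality step line

-- ===== PRECONDITION & SPEC =====
-- Pre_ excludes exactly the inputs on which Python A raises ValueError
def Pre_linear_conflicts (amount_conflicts : Int) (cardinality : Int) (overlap : Int) : Prop :=
  overlap ≤ cardinality ∧ 0 < amount_conflicts ∧ 0 < cardinality ∧ 0 < overlap
instance (amount_conflicts : Int) (cardinality : Int) (overlap : Int) : Decidable (Pre_linear_conflicts amount_conflicts cardinality overlap) := by unfold Pre_linear_conflicts; infer_instance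
def pvWitness_linear_conflicts : Int × Int × Int := (3, 3, 1)

def Spec_linear_conflicts (amount_conflicts : Int) (cardinality : Int) (overlap : Int) (out : List (List Int)) : Prop := out = linear_conflicts_alt amount_conflicts cardinality overlap
instance (amount_conflicts : Int) (cardinality : Int) (overlap : Int) (out : List (List Int)) : Decidable (Spec_linear_conflicts amount_conflicts cardinality overlap out) := by unfold Spec_linear_conflicts; infer_instance

-- ===== CLAIM (what is proved, stated in full; the proofs are below) =====
def Claim_equal_linear_conflicts : Prop := ∀ (amount_conflicts : Int) (cardinality : Int) (overlap : Int), Dom_linear_conflicts amount_conflicts cardinality overlap → Pre_linear_conflicts amount_conflicts cardinality overlap → Spec_linear_conflicts amount_conflicts cardinality overlap (linear_conflicts amount_conflicts cardinality overlap)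

-- ===== LEMMAS AND PROOFS =====

-- A's accumulator loop, over any driving list, unrolls to an index-based map
theorem pv_loop_key (c d : Int) : ∀ (L : List Int) (p : Int) (acc : List (List Int)),
    (L.foldl
      (fun (st : Int × List (List Int)) (_ : Int) =>
        (st.1 + d, st.2 ++ [PySem.List.pyRange st.1 (st.1 + c) 1]))
      (p, acc)).2
    = acc ++ (List.range L.length).map
        (fun (k : Nat) => PySem.List.pyRange (p + (k : Int) * d) (p + (k : Int) * d + c) 1) := by
  intro L
  induction L with
  | nil => intro p acc; simp
  | cons x L ih =>
    intro p acc
    rw [List.foldl_cons]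
    show (L.foldl _ (p + d, acc ++ [PySem.List.pyRange p (p + c) 1])).2 = _
    rw [ih]
    rw [List.length_cons, List.range_succ_eq_map, List.map_cons, List.map_map]
    have h0 : p + ((0 : Nat) : Int) * d = p := by push_cast; ring
    rw [h0, List.append_assoc, List.singleton_append]
    congr 2
    apply List.map_congr_left
    intro k _
    simp only [Function.comp, Nat.succ_eq_add_one]
    have hk : p + ((k : Int) + 1) * d = p + d + (k : Int) * d := by ring
    push_cast
    rw [hk]

-- taking a prefix of a step-1 range is the range up to the cut point
theorem pv_take_pyRange (p e m : Int) (hpm : p ≤ m) (hme : m ≤ e) :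
    (PySem.List.pyRange p e 1).take (m - p).toNat = PySem.List.pyRange p m 1 := by
  rw [PySem.List.pyRange_one_append p m e hpm hme]
  exact List.take_left' (by rw [PySem.List.length_pyRange_one])

-- dropping a prefix of a step-1 range is the range from the cut point
theorem pv_drop_pyRange (p e m : Int) (hpm : p ≤ m) (hme : m ≤ e) :
    (PySem.List.pyRange p e 1).drop (m - p).toNat = PySem.List.pyRange m e 1 := by
  rw [PySem.List.pyRange_one_append p m e hpm hme]
  exact List.drop_left' (by rw [PySem.List.length_pyRange_one])

-- B's peeling loop, started on a long-enough step-1 range, produces the index map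
theorem pv_peel_eq (c d : Int) (hc : 0 ≤ c) (hd : 0 ≤ d) (hdc : d ≤ c) :
    ∀ (n : Nat) (p e : Int), p + c + ((n : Int) - 1) * d ≤ e →
    pv_peel n c d (PySem.List.pyRange p e 1)
      = (List.range n).map
          (fun (k : Nat) => PySem.List.pyRange (p + (k : Int) * d) (p + (k : Int) * d + c) 1) := by
  intro n
  induction n with
  | zero => intro p e _; simp [pv_peel]
  | succ n ih =>
    intro p e he
    have hn : (0 : Int) ≤ (n : Int) := Int.natCast_nonneg n
    push_cast at he
    have hpc : p + c ≤ e := by nlinarith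
    have hpd : p + d ≤ e := by nlinarith
    have htake : PySem.List.slice (PySem.List.pyRange p e 1) none (some c)
        = PySem.List.pyRange p (p + c) 1 := by
      rw [PySem.List.slice_to _ hc]
      have : c.toNat = (p + c - p).toNat := by omega
      rw [this]
      exact pv_take_pyRange p e (p + c) (by omega) hpc
    have hdrop : PySem.List.slice (PySem.List.pyRange p e 1) (some d) none
        = PySem.List.pyRange (p + d) e 1 := by
      rw [PySem.List.slice_from _ hd]
      have : d.toNat = (p + d - p).toNat := by omega
      rw [this]
      exact pv_drop_pyRange p e (p + d) (by omega) hpd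
    show PySem.List.slice _ none (some c) :: pv_peel n c d (PySem.List.slice _ (some d) none) = _
    rw [htake, hdrop, ih (p + d) e (by nlinarith)]
    rw [List.range_succ_eq_map, List.map_cons, List.map_map]
    have h0 : p + ((0 : Nat) : Int) * d = p := by push_cast; ring
    rw [h0]
    congr 1
    apply List.map_congr_left
    intro k _
    simp only [Function.comp]
    have hk : p + d + (k : Int) * d = p + ((k : Int) + 1) * d := by ring
    push_cast
    rw [hk]

theorem linear_conflicts_eq (a c o : Int)
    (hp : Pre_linear_conflicts a c o) :
    linear_conflicts a c o = linear_conflicts_alt a c o := by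
  obtain ⟨hoc, ha, hc, ho⟩ := hp
  unfold linear_conflicts linear_conflicts_alt
  rw [pv_loop_key c (c - o), List.nil_append, PySem.List.length_pyRange_one]
  show _ = pv_peel a.toNat c (c - o) (PySem.List.pyRange 1 (1 + c + (a - 1) * (c - o)) 1)
  have ha' : ((a.toNat : Int)) = a := Int.toNat_of_nonneg (le_of_lt ha)
  rw [pv_peel_eq c (c - o) (le_of_lt hc) (by omega) (by omega) a.toNat 1
        (1 + c + (a - 1) * (c - o)) (by rw [ha'])]
  have hz : (a - 0).toNat = a.toNat := by omega
  rw [hz]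

-- ===== VERDICT (by name: the statement is the Claim_ definition above) =====
theorem linear_conflicts_spec : Claim_equal_linear_conflicts := by
  intro a c o _ hp
  unfold Spec_linear_conflicts
  exact linear_conflicts_eq a c o hp
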